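-- pv_equiv track=rewrite | github.com/TruongHuynhTrungNghia/AnnieLearnPython | ontap3_bai12.py | findConsequence
-- ===== SOURCE A (Python) =====
-- def findConsequence(item): #3n+2 ->O(n)=n
--     indexmax=None
--     count=0
--     countmax=0
--     for i in range(len(item)): #n+1
--         if item[i]>0:
--             count+=1
--         else:
--             if count>countmax:#2n
--                 countmax=count
--                 indexmax=i-countmax
--             count=0
--     if count>countmax: #1
--         indexmax=len(item)-count
--     return indexmax
-- ===== SOURCE B (Python) =====
-- def findConsequence(item):
--     # Phase 1: collect all maximal runs of positive numbers as (start, length).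
--     runs = []
--     start = None
--     for i, x in enumerate(item):
--         if x > 0:
--             if start is None:
--                 start = i
--         else:
--             if start is not None:
--                 runs.append((start, i - start))
--                 start = None
--     if start is not None:
--         runs.append((start, len(item) - start))
--     # Phase 2: pick the first run with the greatest length.
--     best = None
--     for run in runs:
--         if best is None or run[1] > best[1]:
--             best = run
--     return None if best is None else best[0]
-- ===== Notes on version B (the rewrite author's own statement) =====
-- stated objective: alternative
-- what changed: B splits A's single interleaved max-tracking accumulator into two explicit phases: first collect all maximal positive runs as (start, length) pairs, then scan that list for the first longest run.
import Mathlib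
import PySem

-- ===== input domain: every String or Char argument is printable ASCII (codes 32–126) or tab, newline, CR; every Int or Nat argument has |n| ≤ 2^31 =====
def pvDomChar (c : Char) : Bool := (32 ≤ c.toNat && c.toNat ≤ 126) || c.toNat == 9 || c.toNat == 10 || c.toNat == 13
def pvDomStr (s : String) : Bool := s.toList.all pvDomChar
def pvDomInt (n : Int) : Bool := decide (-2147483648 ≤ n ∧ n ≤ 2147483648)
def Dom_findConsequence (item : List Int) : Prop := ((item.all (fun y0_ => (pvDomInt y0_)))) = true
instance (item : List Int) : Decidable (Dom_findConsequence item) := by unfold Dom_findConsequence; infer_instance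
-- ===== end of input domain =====

-- B restructures A's single interleaved accumulator into two passes (collect positive runs, then pick the first longest); same O(n) cost, return values proved equal.

-- ===== PORT A =====
-- A's for-loop over range(len(item)) with state (indexmax, count, countmax).
def loopA : List Int → Int → Option Int → Int → Int → Option Int × Int × Int
  | [], _, indexmax, count, countmax => (indexmax, count, countmax)
  | x :: xs, i, indexmax, count, countmax =>
    if x > 0 then loopA xs (i + 1) indexmax (count + 1) countmax
    else if count > countmax then loopA xs (i + 1) (some (i - count)) 0 count
    else loopA xs (i + 1) indexmax 0 countmax

def findConsequence (item : List Int) : Option Int :=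
  let r := loopA item 0 none 0 0
  if r.2.1 > r.2.2 then some ((item.length : Int) - r.2.1) else r.1

-- ===== PORT B =====
-- B phase 1: collect maximal runs of positives as (start, length) pairs; `st` is the open run's start.
def loopB : List Int → Int → List (Int × Int) → Option Int → List (Int × Int) × Option Int
  | [], _, runs, st => (runs, st)
  | x :: xs, i, runs, st =>
    if x > 0 then
      match st with
      | none => loopB xs (i + 1) runs (some i)
      | some s => loopB xs (i + 1) runs (some s)
    else
      match st with
      | none => loopB xs (i + 1) runs none
      | some s => loopB xs (i + 1) (runs ++ [(s, i - s)]) none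

-- B phase 2: first run with the greatest length (strict comparison keeps the first).
def pickB : List (Int × Int) → Option (Int × Int) → Option (Int × Int)
  | [], best => best
  | r :: rs, best =>
    match best with
    | none => pickB rs (some r)
    | some b => if r.2 > b.2 then pickB rs (some r) else pickB rs (some b)

def findConsequence_alt (item : List Int) : Option Int :=
  let p := loopB item 0 [] none
  let runs := match p.2 with
    | none => p.1
    | some s => p.1 ++ [(s, (item.length : Int) - s)]
  match pickB runs none with
  | none => none
  | some b => some b.1

-- ===== PRECONDITION & SPEC =====
def Spec_findConsequence (item : List Int) (out : Option Int) : Prop := out = findConsequence_alt item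
instance (item : List Int) (out : Option Int) : Decidable (Spec_findConsequence item out) := by unfold Spec_findConsequence; infer_instance

-- ===== CLAIM (what is proved, stated in full; the proofs are below) =====
def Claim_equal_findConsequence : Prop := ∀ (item : List Int), Dom_findConsequence item → Spec_findConsequence item (findConsequence item)

-- ===== LEMMAS AND PROOFS =====

-- Invariant on the open-run state: A's `count` is the length of B's open run (≥ 1), or 0 if none.
def InvOpen (i : Int) (st : Option Int) (c : Int) : Prop :=
  match st with
  | none => c = 0
  | some s => c = i - s ∧ 1 ≤ c

-- Invariant on the best-so-far state: picking over B's closed runs yields A's (indexmax, countmax).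
def InvBest (im : Option Int) (cm : Int) (runs : List (Int × Int)) : Prop :=
  0 ≤ cm ∧ pickB runs none = im.map (fun s => (s, cm)) ∧ (im = none → cm = 0)

theorem pickB_append (rs ts : List (Int × Int)) (b : Option (Int × Int)) :
    pickB (rs ++ ts) b = pickB ts (pickB rs b) := by
  induction rs generalizing b with
  | nil => rfl
  | cons r rs ih =>
    cases b with
    | none => simpa [pickB] using ih (some r)
    | some bb =>
      by_cases h : r.2 > bb.2 <;> simp [pickB, h, ih]

theorem loop_inv (xs : List Int) (i : Int) (im : Option Int) (c cm : Int)
    (runs : List (Int × Int)) (st : Option Int)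
    (h1 : InvOpen i st c) (h2 : InvBest im cm runs) :
    InvOpen (i + xs.length) (loopB xs i runs st).2 (loopA xs i im c cm).2.1 ∧
    InvBest (loopA xs i im c cm).1 (loopA xs i im c cm).2.2 (loopB xs i runs st).1 := by
  induction xs generalizing i im c cm runs st with
  | nil => simpa [loopA, loopB] using ⟨h1, h2⟩
  | cons x xs ih =>
    have hlen : i + ((x :: xs).length : Int) = (i + 1) + (xs.length : Int) := by
      push_cast [List.length_cons]; ring
    rw [hlen]
    by_cases hx : x > 0
    · cases st with
      | none =>
        have hc : c = 0 := h1
        subst hc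
        simp only [loopA, loopB, if_pos hx]
        exact ih (i + 1) im 1 cm runs (some i) (by constructor <;> omega) h2
      | some s =>
        obtain ⟨hcs, hc1⟩ := h1
        simp only [loopA, loopB, if_pos hx]
        exact ih (i + 1) im (c + 1) cm runs (some s) (by constructor <;> omega) h2
    · cases st with
      | none =>
        have hc : c = 0 := h1
        obtain ⟨hcm, hpick, hn⟩ := h2
        have hcc : ¬ c > cm := by omega
        simp only [loopA, loopB, if_neg hx, if_neg hcc]
        exact ih (i + 1) im 0 cm runs none rfl ⟨hcm, hpick, hn⟩
      | some s =>
        obtain ⟨hcs, hc1⟩ := h1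
        obtain ⟨hcm, hpick, hn⟩ := h2
        cases him : im with
        | none =>
          have hcm0 : cm = 0 := hn him
          have hcc : c > cm := by omega
          simp only [loopA, loopB, if_neg hx, if_pos hcc]
          apply ih (i + 1) (some (i - c)) 0 c (runs ++ [(s, i - s)]) none rfl
          refine ⟨by omega, ?_, by simp⟩
          rw [pickB_append, hpick, him]
          simp only [Option.map_none, Option.map_some, pickB]
          have : i - c = s := by omega
          have : (i : Int) - s = c := by omega
          simp_all
        | some bs =>
          rw [him] at hpick
          by_cases hcc : c > cm
          · simp only [loopA, loopB, if_neg hx, if_pos hcc]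
            apply ih (i + 1) (some (i - c)) 0 c (runs ++ [(s, i - s)]) none rfl
            refine ⟨by omega, ?_, by simp⟩
            rw [pickB_append, hpick]
            have hgt : (i : Int) - s > cm := by omega
            simp only [pickB, Option.map_some]
            rw [if_pos hgt]
            have h1' : i - c = s := by omega
            have h2' : (i : Int) - s = c := by omega
            rw [h1', h2']
          · simp only [loopA, loopB, if_neg hx, if_neg hcc]
            apply ih (i + 1) (some bs) 0 cm (runs ++ [(s, i - s)]) none rfl
            refine ⟨hcm, ?_, fun h => by cases h⟩
            rw [pickB_append, hpick]
            have hle : ¬ ((i : Int) - s > cm) := by omega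
            simp only [Option.map_some, pickB]
            rw [if_neg hle]

-- ===== VERDICT (by name: the statement is the Claim_ definition above) =====
theorem findConsequence_spec : Claim_equal_findConsequence := by
  intro item _
  unfold Spec_findConsequence findConsequence findConsequence_alt
  obtain ⟨h1, h2⟩ := loop_inv item 0 none 0 0 [] none rfl ⟨le_refl 0, rfl, fun _ => rfl⟩
  simp only []
  set r := loopA item 0 none 0 0 with hr
  set p := loopB item 0 [] none with hp
  obtain ⟨hcm, hpick, hn⟩ := h2
  cases hst : p.2 with
  | none =>
    rw [hst] at h1
    have hc0 : r.2.1 = 0 := h1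
    have hcc : ¬ r.2.1 > r.2.2 := by omega
    rw [if_neg hcc, hpick]
    cases r.1 <;> simp
  | some s =>
    rw [hst] at h1
    obtain ⟨hcs, hc1⟩ := h1
    rw [pickB_append, hpick]
    cases him : r.1 with
    | none =>
      have hcm0 : r.2.2 = 0 := hn him
      have hcc : r.2.1 > r.2.2 := by omega
      rw [if_pos hcc]
      simp only [Option.map_none, pickB]
      have : (item.length : Int) - r.2.1 = s := by omega
      rw [this]
    | some bs =>
      simp only [Option.map_some, pickB]
      by_cases hcc : r.2.1 > r.2.2
      · have hgt : (item.length : Int) - s > r.2.2 := by omega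
        rw [if_pos hcc, if_pos hgt]
        have : (item.length : Int) - r.2.1 = s := by omega
        rw [this]
      · have hle : ¬ ((item.length : Int) - s > r.2.2) := by omega
        rw [if_neg hcc, if_neg hle]
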